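-- pv_equiv track=rewrite | github.com/mspagon/challenges | random_delete_later.py | sort_competitors
-- ===== SOURCE A (Python) =====
-- from collections import defaultdict
--
-- def sort_competitors(competitors_count: dict):
--     '''Sorts a dictionary of competitor counts and breaks ties alphabetically. Returns a list of competitor names.'''
--     group_by_count = defaultdict(list)
--     for competitor, count in competitors_count.items():
--         group_by_count[count].append(competitor)
--
--     competitors = []
--     for count, competitor in sorted(group_by_count.items(), reverse=True):
--         if count > 0:
--             for name in sorted(competitor):
--                 competitors.append(name)
--     return competitors
-- ===== SOURCE B (Python) =====
-- def sort_competitors(competitors_count: dict):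
--     '''Sorts a dictionary of competitor counts and breaks ties alphabetically. Returns a list of competitor names.'''
--     ordered = sorted(competitors_count.items(), key=lambda kv: (-kv[1], kv[0]))
--     return [name for name, count in ordered if count > 0]
-- ===== Notes on version B (the rewrite author's own statement) =====
-- stated objective: simpler
-- what changed: Replaced the defaultdict grouping plus nested per-group sorts with one flat sort of the items by the key (-count, name) followed by a single filtering extraction pass.
import Mathlib
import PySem

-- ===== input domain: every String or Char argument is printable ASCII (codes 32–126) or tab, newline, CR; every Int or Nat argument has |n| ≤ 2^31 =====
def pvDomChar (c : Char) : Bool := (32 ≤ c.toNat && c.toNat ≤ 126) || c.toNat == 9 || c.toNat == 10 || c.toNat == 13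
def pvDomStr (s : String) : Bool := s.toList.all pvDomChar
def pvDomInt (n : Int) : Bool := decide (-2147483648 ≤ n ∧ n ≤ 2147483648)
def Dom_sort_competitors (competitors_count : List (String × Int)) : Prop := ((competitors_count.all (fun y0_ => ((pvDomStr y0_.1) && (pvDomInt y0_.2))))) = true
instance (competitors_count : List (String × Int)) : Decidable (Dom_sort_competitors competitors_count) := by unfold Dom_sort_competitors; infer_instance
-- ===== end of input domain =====

-- B replaces A's defaultdict grouping + nested per-group sorts by one flat sort on the key
-- (-count, name) and a single filtering extraction pass (objective: simpler; return value only).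

-- ===== PORT A =====
-- the dict argument arrives as an association list; iterating the dict's items = the PySem.Dict view
def sort_competitors (competitors_count : List (String × Int)) : List String :=
  let d := PySem.Dict.ofList competitors_count
  let group_by_count : PySem.Dict Int (List String) :=
    d.items.foldl (fun g p => g.modify p.2 [] (fun l => l ++ [p.1])) PySem.Dict.empty
  let pairs := PySem.List.sorted2 group_by_count.items (fun p => p.1) (fun p => p.2) true
  pairs.foldl (fun competitors p =>
    if 0 < p.1 then
      (PySem.List.sorted p.2 (fun x => x)).foldl (fun cs name => cs ++ [name]) competitors
    else competitors) []

-- ===== PORT B =====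
def sort_competitors_alt (competitors_count : List (String × Int)) : List String :=
  let ordered := PySem.List.sorted2 (PySem.Dict.ofList competitors_count).items
      (fun kv => -kv.2) (fun kv => kv.1) false
  (ordered.filter (fun kv => decide (0 < kv.2))).map (fun kv => kv.1)

-- ===== PRECONDITION & SPEC =====
def Spec_sort_competitors (competitors_count : List (String × Int)) (out : List String) : Prop := out = sort_competitors_alt competitors_count
instance (competitors_count : List (String × Int)) (out : List String) : Decidable (Spec_sort_competitors competitors_count out) := by unfold Spec_sort_competitors; infer_instance

-- ===== CLAIM (what is proved, stated in full; the proofs are below) =====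
def Claim_equal_sort_competitors : Prop := ∀ (competitors_count : List (String × Int)), Dom_sort_competitors competitors_count → Spec_sort_competitors competitors_count (sort_competitors competitors_count)

-- ===== LEMMAS AND PROOFS =====

def pvLex {α κ₁ κ₂ : Type} [LT κ₁] [DecidableLT κ₁] [LT κ₂] [DecidableLT κ₂]
    (k1 : α → κ₁) (k2 : α → κ₂) (a b : α) : Bool :=
  decide (k1 a < k1 b) || (!decide (k1 b < k1 a) && decide (k2 a < k2 b))

lemma sorted2_eq_foldl {α κ₁ κ₂ : Type} [LT κ₁] [DecidableLT κ₁] [LT κ₂] [DecidableLT κ₂]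
    (xs : List α) (k1 : α → κ₁) (k2 : α → κ₂) :
    PySem.List.sorted2 xs k1 k2 false
      = xs.foldl (fun acc x => PySem.List.insertBy (pvLex k1 k2) x acc) [] := rfl

lemma sorted2_rev_eq_foldl {α κ₁ κ₂ : Type} [LT κ₁] [DecidableLT κ₁] [LT κ₂] [DecidableLT κ₂]
    (xs : List α) (k1 : α → κ₁) (k2 : α → κ₂) :
    PySem.List.sorted2 xs k1 k2 true
      = xs.foldl (fun acc x => PySem.List.insertBy (fun a b => pvLex k1 k2 b a) x acc) [] := rfl

lemma pvLex_eq_true_iff {α κ₁ κ₂ : Type} [LT κ₁] [DecidableLT κ₁] [LT κ₂] [DecidableLT κ₂]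
    (k1 : α → κ₁) (k2 : α → κ₂) (x y : α) :
    pvLex k1 k2 x y = true ↔ (k1 x < k1 y ∨ (¬ k1 y < k1 x ∧ k2 x < k2 y)) := by
  simp [pvLex]

lemma pvLex_eq_false_iff {α κ₁ κ₂ : Type} [LT κ₁] [DecidableLT κ₁] [LT κ₂] [DecidableLT κ₂]
    (k1 : α → κ₁) (k2 : α → κ₂) (x y : α) :
    pvLex k1 k2 x y = false ↔ (¬ k1 x < k1 y ∧ (k1 y < k1 x ∨ ¬ k2 x < k2 y)) := by
  simp [pvLex, Bool.or_eq_false_iff, imp_iff_not_or]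



lemma pvLex_asym {α κ₁ κ₂ : Type} [LT κ₁] [DecidableLT κ₁] [LT κ₂] [DecidableLT κ₂]
    (k1 : α → κ₁) (k2 : α → κ₂)
    (hasym₁ : ∀ x y : κ₁, x < y → ¬ y < x) (hasym₂ : ∀ x y : κ₂, x < y → ¬ y < x)
    (a b : α) (h : pvLex k1 k2 a b = true) : pvLex k1 k2 b a = false := by
  rw [pvLex_eq_true_iff] at h
  rw [pvLex_eq_false_iff]
  rcases h with h | ⟨h1, h2⟩
  · exact ⟨hasym₁ _ _ h, Or.inl h⟩
  · exact ⟨h1, Or.inr (hasym₂ _ _ h2)⟩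

lemma pvLex_negtrans {α κ₁ κ₂ : Type} [LT κ₁] [DecidableLT κ₁] [LT κ₂] [DecidableLT κ₂]
    (k1 : α → κ₁) (k2 : α → κ₂)
    (htri₁ : ∀ x y : κ₁, x < y ∨ x = y ∨ y < x) (htr₁ : ∀ x y z : κ₁, x < y → y < z → x < z)
    (htri₂ : ∀ x y : κ₂, x < y ∨ x = y ∨ y < x) (htr₂ : ∀ x y z : κ₂, x < y → y < z → x < z)
    (a b c : α)
    (h1 : pvLex k1 k2 c b = false) (h2 : pvLex k1 k2 b a = false) :
    pvLex k1 k2 c a = false := by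
  rw [pvLex_eq_false_iff] at h1 h2 ⊢
  obtain ⟨hcb, hcb2⟩ := h1
  obtain ⟨hba, hba2⟩ := h2
  have hfst : ¬ k1 c < k1 a := by
    intro hca
    rcases htri₁ (k1 a) (k1 b) with h | h | h
    · exact hcb (htr₁ _ _ _ hca h)
    · exact hcb (h ▸ hca)
    · exact hba h
  refine ⟨hfst, ?_⟩
  rcases hcb2 with h | h
  · rcases htri₁ (k1 a) (k1 b) with h' | h' | h'
    · exact Or.inl (htr₁ _ _ _ h' h)
    · exact Or.inl (h' ▸ h)
    · exact absurd h' hba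
  · rcases hba2 with h' | h'
    · rcases htri₁ (k1 b) (k1 c) with h'' | h'' | h''
      · exact Or.inl (htr₁ _ _ _ h' h'')
      · exact Or.inl (h'' ▸ h')
      · exact absurd h'' hcb
    · refine Or.inr fun hca => ?_
      rcases htri₂ (k2 a) (k2 b) with h'' | h'' | h''
      · exact h (htr₂ _ _ _ hca h'')
      · exact h (h'' ▸ hca)
      · exact h' h''
lemma pairwise_insertBy {α : Type} (before : α → α → Bool)
    (hasym : ∀ a b, before a b = true → before b a = false)
    (htrans : ∀ a b c, before c b = false → before b a = false → before c a = false)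
    (x : α) (l : List α) (hl : l.Pairwise (fun a b => before b a = false)) :
    (PySem.List.insertBy before x l).Pairwise (fun a b => before b a = false) := by
  induction l with
  | nil => simp [PySem.List.insertBy]
  | cons y ys ih =>
    rw [List.pairwise_cons] at hl
    obtain ⟨hy, hys⟩ := hl
    by_cases h : before x y = true
    · rw [PySem.List.insertBy, if_pos h]
      refine List.pairwise_cons.2 ⟨?_, List.pairwise_cons.2 ⟨hy, hys⟩⟩
      intro z hz
      rcases List.mem_cons.1 hz with rfl | hz
      · exact hasym _ _ h
      · exact htrans _ _ _ (hy z hz) (hasym _ _ h)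
    · rw [PySem.List.insertBy, if_neg h]
      refine List.pairwise_cons.2 ⟨?_, ih hys⟩
      intro z hz
      rcases (PySem.List.mem_insertBy before x z ys).1 hz with rfl | hz
      · exact Bool.eq_false_iff.2 h
      · exact hy z hz

lemma pairwise_foldl_insertBy {α : Type} (before : α → α → Bool)
    (hasym : ∀ a b, before a b = true → before b a = false)
    (htrans : ∀ a b c, before c b = false → before b a = false → before c a = false)
    (xs : List α) :
    (xs.foldl (fun acc x => PySem.List.insertBy before x acc) []).Pairwise
      (fun a b => before b a = false) := by
  suffices h : ∀ acc, acc.Pairwise (fun a b => before b a = false) →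
      (xs.foldl (fun acc x => PySem.List.insertBy before x acc) acc).Pairwise
        (fun a b => before b a = false) from h [] (by simp)
  induction xs with
  | nil => intro acc hacc; simpa using hacc
  | cons x xs ih =>
    intro acc hacc
    exact ih _ (pairwise_insertBy before hasym htrans x acc hacc)

lemma foldl_append_sorted_if (l : List (Int × List String)) (acc : List String) :
    l.foldl (fun competitors p =>
      if 0 < p.1 then
        (PySem.List.sorted p.2 (fun x => x)).foldl (fun cs name => cs ++ [name]) competitors
      else competitors) acc
    = acc ++ (l.filter (fun p => decide (0 < p.1))).flatMap
        (fun p => PySem.List.sorted p.2 (fun x => x)) := by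
  induction l generalizing acc with
  | nil => simp
  | cons p ps ih =>
    rw [List.foldl_cons]
    by_cases h : 0 < p.1
    · rw [if_pos h, PySem.List.foldl_append_singleton, ih, List.filter_cons,
        if_pos (by simpa using h), List.flatMap_cons, ← List.append_assoc]
    · rw [if_neg h, ih, List.filter_cons, if_neg (by simpa using h)]

def pvCnt (cc : List (String × Int)) (n : String) : Int := (PySem.Dict.ofList cc).getD n 0
def pvS (cc : List (String × Int)) (a b : String) : Prop :=
  pvCnt cc b < pvCnt cc a ∨ (pvCnt cc a = pvCnt cc b ∧ a < b)

theorem sort_competitors_eq (cc : List (String × Int)) :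
    sort_competitors cc = sort_competitors_alt cc := by
  -- shared input dict facts
  set d := PySem.Dict.ofList cc with hd
  have hnd : d.keys.Nodup := PySem.Dict.nodup_keys_ofList cc
  have hndfst : (d.items.map Prod.fst).Nodup := by
    simpa only [PySem.Dict.keys] using hnd
  have hcnt : ∀ n c, (n, c) ∈ d.items → pvCnt cc n = c := by
    intro n c hm
    exact PySem.Dict.getD_of_mem_items d hm hnd 0
  have hSasym : ∀ a b : String, pvS cc a b → pvS cc b a → False := by
    intro a b h1 h2
    rcases h1 with h1 | ⟨e1, l1⟩ <;> rcases h2 with h2 | ⟨e2, l2⟩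
    · exact absurd h2 (lt_asymm h1)
    · exact absurd h1 (by rw [e2]; exact lt_irrefl _)
    · exact absurd h2 (by rw [e1]; exact lt_irrefl _)
    · exact absurd l2 (lt_asymm l1)
  have hSirr : ∀ a : String, ¬ pvS cc a a := by
    rintro a (h | ⟨-, h⟩) <;> exact lt_irrefl _ h
  -- ===== A side =====
  set g : PySem.Dict Int (List String) :=
    d.items.foldl (fun g p => g.modify p.2 [] (fun l => l ++ [p.1])) PySem.Dict.empty with hg
  have hgnd : g.keys.Nodup := by
    exact PySem.Dict.nodup_keys_foldl_modify_key d.items Prod.snd []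
      (fun g p => fun l => l ++ [p.1]) PySem.Dict.empty (by simp)
  have hgkeys : g.keys = PySem.Set.ofList (d.items.map Prod.snd) := by
    rw [hg]
    exact (PySem.Dict.keys_foldl_modify_key d.items Prod.snd []
      (fun g p => fun l => l ++ [p.1]) PySem.Dict.empty).trans
      (by rw [PySem.Dict.keys_empty, PySem.Set.update_nil_left])
  have hgv : ∀ c : Int, g.getD c [] = (d.items.filter (fun p => p.2 == c)).map Prod.fst := by
    intro c
    have hswap : g = (d.items.map Prod.swap).foldl
        (fun gd q => gd.modify q.1 [] (fun l => l ++ [q.2])) PySem.Dict.empty := by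
      rw [hg, List.foldl_map]
      simp only [Prod.fst_swap, Prod.snd_swap]
    rw [hswap, PySem.Dict.getD_foldl_modify_append]
    simp [PySem.Dict.getD_empty, List.filter_map, List.map_map, Function.comp_def]
  have hmemg : ∀ (c : Int) (ns : List String),
      (c, ns) ∈ g.items ↔ c ∈ g.keys ∧ ns = g.getD c [] := by
    intro c ns
    constructor
    · intro h
      exact ⟨PySem.Dict.mem_keys_of_mem_items _ h,
        (PySem.Dict.getD_of_mem_items g h hgnd []).symm⟩
    · rintro ⟨hk, rfl⟩
      have hne : g.get? c ≠ none := fun h =>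
        ((PySem.Dict.get?_eq_none_iff_not_mem_keys g c).1 h) hk
      obtain ⟨v, hv⟩ := Option.ne_none_iff_exists'.1 hne
      have hveq : g.getD c [] = v := by rw [PySem.Dict.getD_eq_get?_getD, hv]; rfl
      rw [hveq]
      exact (PySem.Dict.get?_eq_some_iff_mem_items g c v hgnd).1 hv
  have hgrpmem : ∀ (c : Int) (n : String), n ∈ g.getD c [] ↔ (n, c) ∈ d.items := by
    intro c n
    rw [hgv]
    simp only [List.mem_map, List.mem_filter, beq_iff_eq]
    constructor
    · rintro ⟨⟨pn, pc⟩, ⟨hp, rfl⟩, rfl⟩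
      exact hp
    · intro h
      exact ⟨(n, c), ⟨h, rfl⟩, rfl⟩
  set pairs := PySem.List.sorted2 g.items (fun p => p.1) (fun p => p.2) true with hpairs
  have hpermA : pairs.Perm g.items := PySem.List.sorted2_perm _ _ _ _
  have hpwA0 : pairs.Pairwise (fun a b => pvLex (fun p : Int × List String => p.1) (fun p => p.2) a b = false) := by
    rw [hpairs, sorted2_rev_eq_foldl]
    exact pairwise_foldl_insertBy _
      (fun a b h => pvLex_asym _ _ (fun x y h => lt_asymm h) (fun x y h => lt_asymm h) b a h)
      (fun a b c h1 h2 => pvLex_negtrans _ _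
        (fun x y => lt_trichotomy x y) (fun x y z h h' => h.trans h')
        (fun x y => lt_trichotomy x y) (fun x y z h h' => h.trans h') c b a h2 h1)
      g.items
  have hgfst : (g.items.map Prod.fst).Nodup := by
    simpa only [PySem.Dict.keys] using hgnd
  have hpairsfst : (pairs.map Prod.fst).Nodup :=
    ((hpermA.map Prod.fst).nodup_iff).2 hgfst
  have hdesc : pairs.Pairwise (fun a b => b.1 < a.1) := by
    refine (hpwA0.and (List.pairwise_map.1 hpairsfst)).imp ?_
    rintro a b ⟨hf, hne⟩
    rw [pvLex_eq_false_iff] at hf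
    rcases lt_trichotomy a.1 b.1 with h | h | h
    · exact absurd h hf.1
    · exact absurd h hne
    · exact h
  have houteqA : sort_competitors cc
      = (pairs.filter (fun p => decide (0 < p.1))).flatMap
          (fun p => PySem.List.sorted p.2 (fun x => x)) := by
    have he : sort_competitors cc = pairs.foldl (fun competitors p =>
        if 0 < p.1 then
          (PySem.List.sorted p.2 (fun x => x)).foldl (fun cs name => cs ++ [name]) competitors
        else competitors) [] := rfl
    rw [he, foldl_append_sorted_if, List.nil_append]
  set outA := (pairs.filter (fun p => decide (0 < p.1))).flatMap
      (fun p => PySem.List.sorted p.2 (fun x => x)) with houtA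
  have hgroup : ∀ p : Int × List String, p ∈ pairs →
      (∀ n ∈ p.2, (n, p.1) ∈ d.items) ∧ p.2.Nodup := by
    intro p hp
    have hpg : p ∈ g.items := hpermA.mem_iff.1 hp
    obtain ⟨c, ns⟩ := p
    have hns : ns = g.getD c [] := ((hmemg c ns).1 hpg).2
    constructor
    · intro n hn
      exact (hgrpmem c n).1 (hns ▸ hn)
    · rw [hns, hgv]
      exact ((List.filter_sublist).map Prod.fst).nodup hndfst
  have hpwOutA : outA.Pairwise (pvS cc) := by
    rw [houtA, List.pairwise_flatMap]
    constructor
    · intro p hp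
      have hp' : p ∈ pairs := (List.mem_filter.1 hp).1
      obtain ⟨hmem, hnodup⟩ := hgroup p hp'
      have hle : (PySem.List.sorted p.2 (fun x => x)).Pairwise (fun a b => a ≤ b) :=
        PySem.List.sorted_pairwise p.2 _
      have hnd2 : (PySem.List.sorted p.2 (fun x => x)).Nodup :=
        (PySem.List.sorted_perm p.2 _ _).nodup_iff.2 hnodup
      refine (hle.and hnd2).imp_of_mem ?_
      intro a b ha hb h
      obtain ⟨hab, hne⟩ := h
      have ha' : a ∈ p.2 := (PySem.List.mem_sorted _ _ _ _).1 ha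
      have hb' : b ∈ p.2 := (PySem.List.mem_sorted _ _ _ _).1 hb
      exact Or.inr ⟨by rw [hcnt a p.1 (hmem a ha'), hcnt b p.1 (hmem b hb')],
        lt_of_le_of_ne hab hne⟩
    · refine (hdesc.filter _).imp_of_mem ?_
      intro p q hp hq hlt x hx y hy
      have hx' : x ∈ p.2 := (PySem.List.mem_sorted _ _ _ _).1 hx
      have hy' : y ∈ q.2 := (PySem.List.mem_sorted _ _ _ _).1 hy
      have hxc := hcnt x p.1 ((hgroup p (List.mem_filter.1 hp).1).1 x hx')
      have hyc := hcnt y q.1 ((hgroup q (List.mem_filter.1 hq).1).1 y hy')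
      exact Or.inl (by rw [hxc, hyc]; exact hlt)
  have hmemOutA : ∀ n, n ∈ outA ↔ ∃ c, (n, c) ∈ d.items ∧ 0 < c := by
    intro n
    rw [houtA]
    simp only [List.mem_flatMap, List.mem_filter, decide_eq_true_eq]
    constructor
    · rintro ⟨p, ⟨hp, hpos⟩, hn⟩
      have hx : n ∈ p.2 := (PySem.List.mem_sorted _ _ _ _).1 hn
      exact ⟨p.1, (hgroup p hp).1 n hx, hpos⟩
    · rintro ⟨c, hmem, hpos⟩
      have hck : c ∈ g.keys := by
        rw [hgkeys]
        exact (PySem.Set.mem_ofList _ _).2 (List.mem_map.2 ⟨(n, c), hmem, rfl⟩)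
      have hgi : (c, g.getD c []) ∈ g.items := (hmemg c _).2 ⟨hck, rfl⟩
      refine ⟨(c, g.getD c []), ⟨hpermA.mem_iff.2 hgi, hpos⟩, ?_⟩
      exact (PySem.List.mem_sorted _ _ _ _).2 ((hgrpmem c n).2 hmem)
  -- ===== B side =====
  set ordered := PySem.List.sorted2 d.items (fun kv => -kv.2) (fun kv => kv.1) false with hord
  have hpermB : ordered.Perm d.items := PySem.List.sorted2_perm _ _ _ _
  have hpwB0 : ordered.Pairwise (fun a b => pvLex (fun kv : String × Int => -kv.2) (fun kv => kv.1) b a = false) := by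
    rw [hord, sorted2_eq_foldl]
    exact pairwise_foldl_insertBy _
      (fun a b h => pvLex_asym _ _ (fun x y h => lt_asymm h) (fun x y h => lt_asymm h) a b h)
      (fun a b c h1 h2 => pvLex_negtrans _ _
        (fun x y => lt_trichotomy x y) (fun x y z h h' => h.trans h')
        (fun x y => lt_trichotomy x y) (fun x y z h h' => h.trans h') a b c h1 h2)
      d.items
  set outB := (ordered.filter (fun kv => decide (0 < kv.2))).map (fun kv => kv.1) with houtB
  have houteqB : sort_competitors_alt cc = outB := rfl
  have hordfst : (ordered.map Prod.fst).Nodup :=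
    ((hpermB.map Prod.fst).nodup_iff).2 hndfst
  have hpwOutB : outB.Pairwise (pvS cc) := by
    rw [houtB, List.pairwise_map]
    refine List.Pairwise.filter _ ?_
    refine (hpwB0.and (List.pairwise_map.1 hordfst)).imp_of_mem ?_
    intro a b ha hb h
    obtain ⟨hf, hne⟩ := h
    have hca : pvCnt cc a.1 = a.2 := hcnt a.1 a.2 (by simpa using hpermB.mem_iff.1 ha)
    have hcb : pvCnt cc b.1 = b.2 := hcnt b.1 b.2 (by simpa using hpermB.mem_iff.1 hb)
    rw [pvLex_eq_false_iff] at hf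
    rcases hf with ⟨h1, h2 | h2⟩
    · exact Or.inl (by rw [hca, hcb]; omega)
    · have hle : b.2 ≤ a.2 := by omega
      rcases lt_or_eq_of_le hle with h | h
      · exact Or.inl (by rw [hca, hcb]; exact h)
      · refine Or.inr ⟨by rw [hca, hcb, h], ?_⟩
        rcases lt_trichotomy a.1 b.1 with h' | h' | h'
        · exact h'
        · exact absurd h' hne
        · exact absurd h' h2
  have hmemOutB : ∀ n, n ∈ outB ↔ ∃ c, (n, c) ∈ d.items ∧ 0 < c := by
    intro n
    rw [houtB]
    simp only [List.mem_map, List.mem_filter, decide_eq_true_eq]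
    constructor
    · rintro ⟨p, ⟨hp, hpos⟩, rfl⟩
      exact ⟨p.2, by simpa using hpermB.mem_iff.1 hp, hpos⟩
    · rintro ⟨c, hmem, hpos⟩
      exact ⟨(n, c), ⟨hpermB.mem_iff.2 hmem, hpos⟩, rfl⟩
  -- ===== combine =====
  have hndA : outA.Nodup := hpwOutA.imp (fun {a b} h => by
    intro e; exact hSirr a (e ▸ h))
  have hndB : outB.Nodup := hpwOutB.imp (fun {a b} h => by
    intro e; exact hSirr a (e ▸ h))
  have hperm : outA.Perm outB := by
    refine List.perm_of_nodup_nodup_toFinset_eq hndA hndB ?_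
    ext n
    simp only [List.mem_toFinset, hmemOutA, hmemOutB]
  rw [houteqA, houteqB]
  exact List.Perm.eq_of_pairwise
    (fun a b _ _ hab hba => absurd hba (fun h => hSasym a b hab h))
    hpwOutA hpwOutB hperm

-- ===== VERDICT (by name: the statement is the Claim_ definition above) =====
theorem sort_competitors_spec : Claim_equal_sort_competitors := by
  intro cc _
  unfold Spec_sort_competitors
  exact sort_competitors_eq cc
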